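-- pv_equiv track=rewrite | github.com/sooy0817/System-Architecture-Diagram | app/nodes/compose.py | _compose_elements
-- ===== SOURCE A (Python) =====
-- from typing import Dict, Any
--
-- def _compose_elements(data: Dict[str, Any]) -> Dict[str, Any]:
--     """Compose diagram elements"""
--     elements = data.get("elements", [])
--
--     composed = {"nodes": [], "edges": [], "groups": []}
--
--     for element in elements:
--         element_type = element.get("type")
--         if element_type == "node":
--             composed["nodes"].append(element)
--         elif element_type == "edge":
--             composed["edges"].append(element)
--         elif element_type == "group":
--             composed["groups"].append(element)
--
--     return composed
-- ===== SOURCE B (Python) =====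
-- def _compose_elements(data):
--     """Compose diagram elements"""
--     elements = data.get("elements", [])
--     return {
--         "nodes": [e for e in elements if e.get("type") == "node"],
--         "edges": [e for e in elements if e.get("type") == "edge"],
--         "groups": [e for e in elements if e.get("type") == "group"],
--     }
-- ===== Notes on version B (the rewrite author's own statement) =====
-- stated objective: idiomatic
-- what changed: A's single pass with an if/elif chain appending into a mutable dict is replaced by building the result dict directly from three independent filtering comprehensions over the elements.
import Mathlib
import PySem

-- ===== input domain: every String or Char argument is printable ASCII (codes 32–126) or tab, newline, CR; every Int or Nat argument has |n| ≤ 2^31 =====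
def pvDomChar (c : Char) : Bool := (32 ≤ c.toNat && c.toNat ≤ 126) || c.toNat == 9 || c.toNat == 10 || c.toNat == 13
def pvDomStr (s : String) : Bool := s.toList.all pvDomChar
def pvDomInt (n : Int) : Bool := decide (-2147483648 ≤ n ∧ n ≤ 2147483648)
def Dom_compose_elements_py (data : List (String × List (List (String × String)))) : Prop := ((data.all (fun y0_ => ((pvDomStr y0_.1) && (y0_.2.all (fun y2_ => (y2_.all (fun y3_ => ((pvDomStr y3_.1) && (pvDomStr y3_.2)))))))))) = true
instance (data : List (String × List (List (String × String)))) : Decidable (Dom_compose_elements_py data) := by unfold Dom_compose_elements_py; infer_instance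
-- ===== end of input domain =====

-- B builds the result dict from three independent filtering passes instead of A's single if/elif pass into a mutable dict (idiomatic/alternative decomposition, same cost).


-- ===== PORT A =====
def compose_elements_py (data : List (String × List (List (String × String)))) : List (String × List (List (String × String))) :=
  -- elements = data.get("elements", [])
  let elements := (PySem.Dict.mk data).getD "elements" []
  -- single pass: append each element to the matching bucket of the accumulator
  let composed := elements.foldl
    (fun (acc : List (List (String × String)) × List (List (String × String)) × List (List (String × String))) element =>
      let elementType := (PySem.Dict.mk element).get? "type"
      if elementType = some "node" then (acc.1 ++ [element], acc.2.1, acc.2.2)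
      else if elementType = some "edge" then (acc.1, acc.2.1 ++ [element], acc.2.2)
      else if elementType = some "group" then (acc.1, acc.2.1, acc.2.2 ++ [element])
      else acc)
    ([], [], [])
  [("nodes", composed.1), ("edges", composed.2.1), ("groups", composed.2.2)]

-- ===== PORT B =====
-- B: the dict is built from three independent filtering passes over elements
def compose_elements_py_alt (data : List (String × List (List (String × String)))) : List (String × List (List (String × String))) :=
  let elements := (PySem.Dict.mk data).getD "elements" []
  [("nodes", elements.filter (fun e => (PySem.Dict.mk e).get? "type" == some "node")),
   ("edges", elements.filter (fun e => (PySem.Dict.mk e).get? "type" == some "edge")),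
   ("groups", elements.filter (fun e => (PySem.Dict.mk e).get? "type" == some "group"))]

-- ===== PRECONDITION & SPEC =====
def Spec_compose_elements_py (data : List (String × List (List (String × String)))) (out : List (String × List (List (String × String)))) : Prop := out = compose_elements_py_alt data
instance (data : List (String × List (List (String × String)))) (out : List (String × List (List (String × String)))) : Decidable (Spec_compose_elements_py data out) := by unfold Spec_compose_elements_py; infer_instance

-- ===== CLAIM (what is proved, stated in full; the proofs are below) =====
def Claim_equal_compose_elements_py : Prop := ∀ (data : List (String × List (List (String × String)))), Dom_compose_elements_py data → Spec_compose_elements_py data (compose_elements_py data)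

-- ===== LEMMAS AND PROOFS =====

-- foldl invariant: each bucket is its initial value followed by the matching filter
theorem compose_fold_inv (elements : List (List (String × String)))
    (a b c : List (List (String × String))) :
    elements.foldl
      (fun (acc : List (List (String × String)) × List (List (String × String)) × List (List (String × String))) element =>
        let elementType := (PySem.Dict.mk element).get? "type"
        if elementType = some "node" then (acc.1 ++ [element], acc.2.1, acc.2.2)
        else if elementType = some "edge" then (acc.1, acc.2.1 ++ [element], acc.2.2)
        else if elementType = some "group" then (acc.1, acc.2.1, acc.2.2 ++ [element])
        else acc)
      (a, b, c)
    = (a ++ elements.filter (fun e => (PySem.Dict.mk e).get? "type" == some "node"),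
       b ++ elements.filter (fun e => (PySem.Dict.mk e).get? "type" == some "edge"),
       c ++ elements.filter (fun e => (PySem.Dict.mk e).get? "type" == some "group")) := by
  induction elements generalizing a b c with
  | nil => simp
  | cons e rest ih =>
    simp only [List.foldl_cons, List.filter_cons]
    by_cases h1 : (PySem.Dict.mk e).get? "type" = some "node"
    · simp [h1, ih, List.append_assoc]
    · by_cases h2 : (PySem.Dict.mk e).get? "type" = some "edge"
      · simp [h2, ih, List.append_assoc]
      · by_cases h3 : (PySem.Dict.mk e).get? "type" = some "group"
        · simp [h3, ih, List.append_assoc]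
        · simp [h1, h2, h3, ih]

-- ===== VERDICT (by name: the statement is the Claim_ definition above) =====
theorem compose_elements_py_spec : Claim_equal_compose_elements_py := by
  intro data _
  unfold Spec_compose_elements_py compose_elements_py compose_elements_py_alt
  simp [compose_fold_inv]
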